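-- pv_equiv track=rewrite | github.com/xuan-ter/MIR_LLVM_Experiment | iterator_pipeline_bench/experiment_iterator_pipeline_mir_llvm_hybrid.py | extract_ir_blocks
-- ===== SOURCE A (Python) =====
-- def extract_ir_blocks(raw_text, wanted_substrings):
--     blocks = []
--     current = []
--     keep = False
--     for line in raw_text.splitlines(True):
--         if line.startswith("; *** IR Dump After "):
--             if current and keep:
--                 blocks.append("".join(current))
--             current = [line]
--             keep = any(s in line for s in wanted_substrings)
--             continue
--         if current:
--             current.append(line)
--     if current and keep:
--         blocks.append("".join(current))
--     return "".join(blocks)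
-- ===== SOURCE B (Python) =====
-- def extract_ir_blocks(raw_text, wanted_substrings):
--     marker = "; *** IR Dump After "
--
--     def span_to_header(ls):
--         # longest prefix of non-header lines, and the remainder (starting at a header, or empty)
--         i = 0
--         while i < len(ls) and not ls[i].startswith(marker):
--             i += 1
--         return ls[:i], ls[i:]
--
--     lines = raw_text.splitlines(True)
--     _, lines = span_to_header(lines)          # drop the preamble before the first header
--     out = []
--     while lines:
--         header, rest = lines[0], lines[1:]
--         body, lines = span_to_header(rest)
--         if any(s in header for s in wanted_substrings):
--             out.append(header + ''.join(body))
--     return ''.join(out)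
-- ===== Notes on version B (the rewrite author's own statement) =====
-- stated objective: alternative
-- what changed: B partitions the line list into header-delimited blocks with an explicit span-to-next-header helper and filters whole blocks by their header line, instead of A's single streaming pass that threads blocks/current/keep state across every line.
import Mathlib
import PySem

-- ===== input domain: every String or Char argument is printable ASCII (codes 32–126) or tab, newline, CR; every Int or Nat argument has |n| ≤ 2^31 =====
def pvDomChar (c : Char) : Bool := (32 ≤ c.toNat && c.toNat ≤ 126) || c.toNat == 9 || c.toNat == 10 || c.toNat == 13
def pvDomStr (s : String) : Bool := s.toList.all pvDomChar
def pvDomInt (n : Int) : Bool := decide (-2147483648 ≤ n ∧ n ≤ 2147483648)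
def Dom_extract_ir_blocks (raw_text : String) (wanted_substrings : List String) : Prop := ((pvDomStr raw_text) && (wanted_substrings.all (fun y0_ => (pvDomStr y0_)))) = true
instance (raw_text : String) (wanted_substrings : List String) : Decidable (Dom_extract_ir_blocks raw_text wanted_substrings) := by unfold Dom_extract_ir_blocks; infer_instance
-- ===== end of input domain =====

-- B replaces A's streaming blocks/current/keep state machine by an explicit
-- span-into-blocks partition filtered by header line (objective: alternative decomposition).

-- shared primitive: raw_text.splitlines(True) (keepends). Exact on the stated
-- ASCII domain, where the only line breaks are '\n', '\r' and '\r\n'.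
def pvSplitKeep : List Char → List (List Char)
  | [] => []
  | '\r' :: '\n' :: rest => ['\r', '\n'] :: pvSplitKeep rest
  | '\n' :: rest => ['\n'] :: pvSplitKeep rest
  | '\r' :: rest => ['\r'] :: pvSplitKeep rest
  | c :: rest =>
    match pvSplitKeep rest with
    | [] => [[c]]
    | l :: ls => (c :: l) :: ls

def pvMarker : List Char := "; *** IR Dump After ".toList

-- ===== PORT A =====
-- one loop step of A: state is (blocks, current, keep)
def aStep (w : List String) (st : List (List Char) × List (List Char) × Bool)
    (line : List Char) : List (List Char) × List (List Char) × Bool :=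
  if PySem.Chars.startswith line pvMarker then
    ((if !st.2.1.isEmpty && st.2.2 then st.1 ++ [st.2.1.flatten] else st.1),
     [line],
     w.any (fun s => PySem.Chars.isIn s.toList line))
  else if st.2.1.isEmpty then st
  else (st.1, st.2.1 ++ [line], st.2.2)

-- A's trailing 'if current and keep: blocks.append(...)'
def aFin (st : List (List Char) × List (List Char) × Bool) : List (List Char) :=
  if !st.2.1.isEmpty && st.2.2 then st.1 ++ [st.2.1.flatten] else st.1

def extract_ir_blocks (raw_text : String) (wanted_substrings : List String) : String :=
  String.ofList (aFin ((pvSplitKeep raw_text.toList).foldl (aStep wanted_substrings)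
    ([], [], false))).flatten

-- ===== PORT B =====
-- Source B's span_to_header: (longest prefix of non-header lines, remainder)
def bSpan : List (List Char) → List (List Char) × List (List Char)
  | [] => ([], [])
  | l :: ls =>
    if PySem.Chars.startswith l pvMarker then ([], l :: ls)
    else (l :: (bSpan ls).1, (bSpan ls).2)

theorem bSpan_snd_length_le (ls : List (List Char)) : (bSpan ls).2.length ≤ ls.length := by
  induction ls with
  | nil => simp [bSpan]
  | cons l ls ih => simp only [bSpan]; split <;> simp <;> omega

-- Source B's while-loop over the remaining lines: each round takes a header,
-- spans its body, and keeps the block iff a wanted substring is in the header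
def bGo (w : List String) : List (List Char) → List (List Char)
  | [] => []
  | h :: ls =>
    (if w.any (fun s => PySem.Chars.isIn s.toList h)
       then [h ++ (bSpan ls).1.flatten] else []) ++ bGo w (bSpan ls).2
  termination_by ls => ls.length
  decreasing_by
    exact Nat.lt_succ_of_le (bSpan_snd_length_le ls)

def extract_ir_blocks_alt (raw_text : String) (wanted_substrings : List String) : String :=
  String.ofList (bGo wanted_substrings (bSpan (pvSplitKeep raw_text.toList)).2).flatten

-- ===== PRECONDITION & SPEC =====
def Spec_extract_ir_blocks (raw_text : String) (wanted_substrings : List String) (out : String) : Prop := out = extract_ir_blocks_alt raw_text wanted_substrings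
instance (raw_text : String) (wanted_substrings : List String) (out : String) : Decidable (Spec_extract_ir_blocks raw_text wanted_substrings out) := by unfold Spec_extract_ir_blocks; infer_instance

-- ===== CLAIM (what is proved, stated in full; the proofs are below) =====
def Claim_equal_extract_ir_blocks : Prop := ∀ (raw_text : String) (wanted_substrings : List String), Dom_extract_ir_blocks raw_text wanted_substrings → Spec_extract_ir_blocks raw_text wanted_substrings (extract_ir_blocks raw_text wanted_substrings)

-- ===== LEMMAS AND PROOFS =====
theorem bSpan_append (ls : List (List Char)) : (bSpan ls).1 ++ (bSpan ls).2 = ls := by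
  induction ls with
  | nil => simp [bSpan]
  | cons l ls ih => simp only [bSpan]; split <;> simp [ih]

theorem bSpan_fst (ls : List (List Char)) :
    ∀ l ∈ (bSpan ls).1, PySem.Chars.startswith l pvMarker = false := by
  induction ls with
  | nil => simp [bSpan]
  | cons l ls ih =>
    simp only [bSpan]; split
    · simp
    · rename_i h; simp_all

theorem bSpan_snd (ls : List (List Char)) :
    (bSpan ls).2 = [] ∨ ∃ h t, (bSpan ls).2 = h :: t ∧ PySem.Chars.startswith h pvMarker = true := by
  induction ls with
  | nil => simp [bSpan]
  | cons l ls ih =>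
    simp only [bSpan]; split
    · rename_i h; exact Or.inr ⟨l, ls, rfl, h⟩
    · exact ih

theorem foldA_body (w : List String) (body : List (List Char))
    (hb : ∀ l ∈ body, PySem.Chars.startswith l pvMarker = false) :
    ∀ rest b c k, c ≠ [] →
    List.foldl (aStep w) (b, c, k) (body ++ rest) = List.foldl (aStep w) (b, c ++ body, k) rest := by
  induction body with
  | nil => intro rest b c k hc; simp
  | cons l body ih =>
    intro rest b c k hc
    have hl := hb l (by simp)
    have hrest : ∀ x ∈ body, PySem.Chars.startswith x pvMarker = false := fun x hx => hb x (by simp [hx])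
    have hstep : aStep w (b, c, k) l = (b, c ++ [l], k) := by
      simp [aStep, hl, List.isEmpty_iff, hc]
    simp only [List.cons_append, List.foldl_cons, hstep]
    rw [ih hrest rest b (c ++ [l]) k (by simp)]
    simp

theorem foldA_body_nil (w : List String) (body : List (List Char))
    (hb : ∀ l ∈ body, PySem.Chars.startswith l pvMarker = false) :
    ∀ rest b k,
    List.foldl (aStep w) (b, [], k) (body ++ rest) = List.foldl (aStep w) (b, ([] : List (List Char)), k) rest := by
  induction body with
  | nil => intro rest b k; simp
  | cons l body ih =>
    intro rest b k
    have hl := hb l (by simp)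
    have hstep : aStep w (b, ([] : List (List Char)), k) l = (b, [], k) := by
      simp [aStep, hl]
    simp only [List.cons_append, List.foldl_cons, hstep]
    exact ih (fun x hx => hb x (by simp [hx])) rest b k

theorem mainA (w : List String) :
    ∀ n (ls : List (List Char)) b c k, ls.length ≤ n → c ≠ [] →
    aFin (List.foldl (aStep w) (b, c, k) ls)
      = b ++ (if k then [(c ++ (bSpan ls).1).flatten] else []) ++ bGo w (bSpan ls).2 := by
  intro n
  induction n with
  | zero =>
    intro ls b c k hlen hc
    have : ls = [] := List.eq_nil_of_length_eq_zero (Nat.le_zero.mp hlen)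
    subst this
    simp [bSpan, bGo, aFin, List.isEmpty_iff, hc]
    split <;> simp
  | succ n ih =>
    intro ls b c k hlen hc
    have hsplit := bSpan_append ls
    have hfst := bSpan_fst ls
    rcases bSpan_snd ls with h2 | ⟨h, t, h2, hh⟩
    · -- remainder empty: whole ls is non-header body
      have : List.foldl (aStep w) (b, c, k) ls = (b, c ++ (bSpan ls).1, k) := by
        conv_lhs => rw [← hsplit, h2, List.append_nil]
        rw [show (bSpan ls).1 = (bSpan ls).1 ++ [] from (List.append_nil _).symm] at hfst ⊢
        rw [foldA_body w (bSpan ls).1 (by simpa using hfst) [] b c k hc]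
        simp
      rw [this, h2]
      simp [aFin, bGo, List.isEmpty_iff, hc]
      split <;> simp
    · -- remainder starts with header h
      have hfold : List.foldl (aStep w) (b, c, k) ls
          = List.foldl (aStep w) (b, c ++ (bSpan ls).1, k) (h :: t) := by
        conv_lhs => rw [← hsplit, h2]
        exact foldA_body w (bSpan ls).1 hfst (h :: t) b c k hc
      have hstep : aStep w (b, c ++ (bSpan ls).1, k) h
          = (b ++ (if k then [(c ++ (bSpan ls).1).flatten] else []), [h],
             w.any (fun s => PySem.Chars.isIn s.toList h)) := by
        simp [aStep, hh, List.isEmpty_iff, hc]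
        split <;> simp
      have htlen : t.length ≤ n := by
        have := congrArg List.length hsplit
        rw [h2] at this
        simp at this
        omega
      rw [hfold]
      simp only [List.foldl_cons, hstep]
      rw [ih t _ [h] _ htlen (by simp)]
      rw [h2]
      simp only [bGo]
      split <;> simp

-- ===== VERDICT (by name: the statement is the Claim_ definition above) =====
theorem extract_ir_blocks_spec : Claim_equal_extract_ir_blocks := by
  intro raw w _
  unfold Spec_extract_ir_blocks extract_ir_blocks extract_ir_blocks_alt
  congr 1
  set ls := pvSplitKeep raw.toList with hls
  have hsplit := bSpan_append ls
  have hfst := bSpan_fst ls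
  rcases bSpan_snd ls with h2 | ⟨h, t, h2, hh⟩
  · have : List.foldl (aStep w) ([], [], false) ls = (([] : List (List Char)), ([] : List (List Char)), false) := by
      conv_lhs => rw [← hsplit, h2, List.append_nil]
      rw [show (bSpan ls).1 = (bSpan ls).1 ++ [] from (List.append_nil _).symm] at hfst ⊢
      rw [foldA_body_nil w (bSpan ls).1 (by simpa using hfst) [] [] false]
      simp
    rw [this, h2]
    simp [aFin, bGo]
  · have hfold : List.foldl (aStep w) ([], [], false) ls
        = List.foldl (aStep w) (([] : List (List Char)), ([] : List (List Char)), false) (h :: t) := by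
      conv_lhs => rw [← hsplit, h2]
      exact foldA_body_nil w (bSpan ls).1 hfst (h :: t) [] false
    have hstep : aStep w (([] : List (List Char)), ([] : List (List Char)), false) h
        = ([], [h], w.any (fun s => PySem.Chars.isIn s.toList h)) := by
      simp [aStep, hh]
    rw [hfold]
    simp only [List.foldl_cons, hstep]
    rw [mainA w t.length t [] [h] _ le_rfl (by simp)]
    rw [h2]
    simp only [bGo]
    split <;> simp
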